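-- pv_equiv track=rewrite | github.com/smeruelo/coding-challenges | atcoder/atcoder_beginner_094/c_many_medians.py | medians
-- ===== SOURCE A (Python) =====
-- def medians(nums):
--     n = len(nums)
--     num_orig_pos = list(zip(nums, range(n)))
--     nums_sorted = sorted(num_orig_pos)
--     medians = []
--     med_left = nums_sorted[(n + 1)//2][0]
--     med_right = nums_sorted[(n + 1)//2 - 1][0]
--     for i in range((n + 1)//2):
--         medians.append((med_left, nums_sorted[i][1]))
--     for i in range((n + 1)//2, n):
--         medians.append((med_right, nums_sorted[i][1]))
--     return map(lambda x: x[0], sorted(medians, key=lambda x: x[1]))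
-- ===== SOURCE B (Python) =====
-- def medians(nums):
--     n = len(nums)
--     k = (n + 1) // 2
--     s = sorted(zip(nums, range(n)))
--     hi = s[k][0]
--     lo = s[k - 1][0]
--     res = [lo] * n
--     for _, p in s[:k]:
--         res[p] = hi
--     return res
-- ===== Notes on version B (the rewrite author's own statement) =====
-- stated objective: faster
-- what changed: B keeps the single sort of (value, position) pairs but replaces A's second pass -- building a (median, position) pair list, re-sorting it by position and mapping out the first components -- with a position-indexed output array prefilled with the upper-half median and overwritten directly at the positions of the lower half.
import Mathlib
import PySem

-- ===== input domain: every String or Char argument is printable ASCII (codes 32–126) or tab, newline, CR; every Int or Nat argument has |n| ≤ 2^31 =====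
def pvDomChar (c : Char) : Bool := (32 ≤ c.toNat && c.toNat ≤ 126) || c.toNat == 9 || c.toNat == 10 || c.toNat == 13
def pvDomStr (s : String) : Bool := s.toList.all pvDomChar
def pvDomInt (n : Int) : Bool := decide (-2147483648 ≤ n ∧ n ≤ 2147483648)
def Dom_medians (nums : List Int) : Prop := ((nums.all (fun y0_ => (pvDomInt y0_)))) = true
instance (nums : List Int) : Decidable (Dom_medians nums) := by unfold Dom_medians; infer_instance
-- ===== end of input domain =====

-- B replaces A's second pass (rebuilding a (median, position) pair list and re-sorting it by
-- position, then mapping) with a position-indexed output array filled directly from the single sort.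


-- ===== PORT A =====
def medians (nums : List Int) : List Int :=
  let n : Int := nums.length
  let num_orig_pos : List (Int × Int) := nums.zip (PySem.List.pyRange 0 n)
  let nums_sorted := PySem.List.sorted2 num_orig_pos Prod.fst Prod.snd
  let med_left := (PySem.List.pyGetD nums_sorted (PySem.Int.floordiv (n + 1) 2) (0, 0)).1
  let med_right := (PySem.List.pyGetD nums_sorted (PySem.Int.floordiv (n + 1) 2 - 1) (0, 0)).1
  let meds1 := (PySem.List.pyRange 0 (PySem.Int.floordiv (n + 1) 2)).foldl
      (fun acc i => acc ++ [(med_left, (PySem.List.pyGetD nums_sorted i (0, 0)).2)]) []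
  let meds := (PySem.List.pyRange (PySem.Int.floordiv (n + 1) 2) n).foldl
      (fun acc i => acc ++ [(med_right, (PySem.List.pyGetD nums_sorted i (0, 0)).2)]) meds1
  (PySem.List.sorted meds (fun x => x.2)).map (fun x => x.1)

-- ===== PORT B =====
def medians_alt (nums : List Int) : List Int :=
  let n : Int := nums.length
  let k := PySem.Int.floordiv (n + 1) 2
  let s := PySem.List.sorted2 (nums.zip (PySem.List.pyRange 0 n)) Prod.fst Prod.snd
  let hi := (PySem.List.pyGetD s k (0, 0)).1
  let lo := (PySem.List.pyGetD s (k - 1) (0, 0)).1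
  let res := PySem.List.pyRepeat [lo] n
  (PySem.List.slice s none (some k)).foldl (fun r p => r.set p.2.toNat hi) res

-- ===== PRECONDITION & SPEC =====
-- Pre_ excludes exactly the lists of fewer than 2 elements, on which A raises IndexError.
def Pre_medians (nums : List Int) : Prop := 2 ≤ nums.length
instance (nums : List Int) : Decidable (Pre_medians nums) := by unfold Pre_medians; infer_instance
def pvWitness_medians : List Int := [3, 1, 4, 1]
def Spec_medians (nums : List Int) (out : List Int) : Prop := out = medians_alt nums
instance (nums : List Int) (out : List Int) : Decidable (Spec_medians nums out) := by unfold Spec_medians; infer_instance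

-- ===== CLAIM (what is proved, stated in full; the proofs are below) =====
def Claim_equal_medians : Prop := ∀ (nums : List Int), Dom_medians nums → Pre_medians nums → Spec_medians nums (medians nums)

-- ===== LEMMAS AND PROOFS =====

-- range(0, t) indexing reads the first t elements
lemma map_pyGetD_range_take (s : List (Int × Int)) (t : Nat) (ht : t ≤ s.length) :
    (PySem.List.pyRange 0 (t : Int)).map (fun i => PySem.List.pyGetD s i (0, 0)) = s.take t := by
  rw [PySem.List.pyRange_one, List.map_map]
  have h0 : ((t : Int) - 0).toNat = t := by omega
  rw [h0]
  apply List.ext_getElem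
  · simp [ht]
  · intro j hj hj2
    simp only [List.getElem_map, List.getElem_range, Function.comp_apply, zero_add,
      PySem.List.pyGetD_natCast, List.getElem_take]
    simp at hj
    rw [List.getD_eq_getElem _ _ (by omega)]

-- the assignment loop of B, element by element
lemma foldl_set_getElem? (ps : List (Int × Int)) (hi : Int)
    (hnn : ∀ p ∈ ps, 0 ≤ p.2) :
    ∀ (res : List Int) (j : Nat),
      (ps.foldl (fun r p => r.set p.2.toNat hi) res)[j]? =
        if (j : Int) ∈ ps.map Prod.snd then (if j < res.length then some hi else none)
        else res[j]? := by
  induction ps with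
  | nil => intro res j; simp
  | cons p ps ih =>
    intro res j
    have hp : 0 ≤ p.2 := hnn p (by simp)
    have hnn' : ∀ q ∈ ps, 0 ≤ q.2 := fun q hq => hnn q (by simp [hq])
    simp only [List.foldl_cons, List.map_cons, List.mem_cons]
    rw [ih hnn' (res.set p.2.toNat hi) j, List.length_set]
    by_cases hmem : (j : Int) ∈ ps.map Prod.snd
    · simp [hmem]
    · by_cases heq : (j : Int) = p.2
      · have : p.2.toNat = j := by omega
        simp [heq, List.getElem?_set, this]
      · have : p.2.toNat ≠ j := by omega
        simp [hmem, heq, this]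

theorem medians_eq (nums : List Int) (h : 2 ≤ nums.length) : medians nums = medians_alt nums := by
  simp only [medians, medians_alt]
  set N := nums.length with hN
  set K : Nat := (N + 1) / 2 with hK
  have hk : PySem.Int.floordiv ((N : Int) + 1) 2 = (K : Int) := by
    have := PySem.Int.floordiv_natCast (N + 1) 2
    push_cast at this ⊢
    exact this
  rw [hk]
  set s := PySem.List.sorted2 (nums.zip (PySem.List.pyRange 0 (N : Int))) Prod.fst Prod.snd with hs
  set hi := (PySem.List.pyGetD s (K : Int) (0, 0)).1 with hhi
  set lo := (PySem.List.pyGetD s ((K : Int) - 1) (0, 0)).1 with hlo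
  -- basic facts
  have hperm : s.Perm (nums.zip (PySem.List.pyRange 0 (N : Int))) :=
    PySem.List.sorted2_perm _ _ _ _
  have hlenr : (PySem.List.pyRange 0 (N : Int)).length = N := by
    rw [PySem.List.length_pyRange_one]; omega
  have hlens : s.length = N := by
    rw [hperm.length_eq, List.length_zip, hlenr]; omega
  have hmsz : (nums.zip (PySem.List.pyRange 0 (N : Int))).map Prod.snd
      = PySem.List.pyRange 0 (N : Int) :=
    List.map_snd_zip (by rw [hlenr])
  have hsnds : (s.map Prod.snd).Perm (PySem.List.pyRange 0 (N : Int)) := by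
    rw [← hmsz]; exact hperm.map _
  have hnodup : (s.map Prod.snd).Nodup :=
    hsnds.nodup_iff.mpr (PySem.List.nodup_pyRange_one _ _)
  have hposnn : ∀ p ∈ s, 0 ≤ p.2 := by
    intro p hp
    have : p.2 ∈ s.map Prod.snd := List.mem_map_of_mem hp
    have := hsnds.mem_iff.mp this
    exact (PySem.List.mem_pyRange_one.mp this).1
  have hKN : K ≤ N := by omega
  have hKs : K ≤ s.length := by omega
  set lowPos := (s.take K).map Prod.snd with hlp
  -- rewrite A's two loops into take/drop maps
  rw [PySem.List.foldl_append_singleton_eq_map, PySem.List.foldl_append_singleton_eq_map]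
  simp only [List.nil_append]
  -- the two index loops read s.take K and s.drop K
  have h1 : (PySem.List.pyRange 0 (K : Int)).map
      (fun i => (hi, (PySem.List.pyGetD s i (0, 0)).2)) =
      (s.take K).map (fun p => (hi, p.2)) := by
    rw [← map_pyGetD_range_take s K hKs, List.map_map]; rfl
  have h2 : (PySem.List.pyRange (K : Int) (N : Int)).map
      (fun i => (lo, (PySem.List.pyGetD s i (0, 0)).2)) =
      (s.drop K).map (fun p => (lo, p.2)) := by
    have hb : (N : Int) = (s.length : Int) := by rw [hlens]
    have h2' := PySem.List.map_pyGetD_pyRange' s ((0 : Int), (0 : Int)) (a := (K : Int))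
      (by positivity)
    rw [Int.toNat_natCast] at h2'
    rw [hb, ← h2', List.map_map]; rfl
  rw [h1, h2]
  set f : Int → Int := fun j => if j ∈ lowPos then hi else lo with hf
  set m' := (PySem.List.pyRange 0 (N : Int)).map (fun j => (f j, j)) with hm'
  have hgmA : (s.take K).map (fun p => (hi, p.2)) ++ (s.drop K).map (fun p => (lo, p.2))
      = s.map (fun p => (f p.2, p.2)) := by
    have hdisj : lowPos.Disjoint ((s.drop K).map Prod.snd) := by
      have hsplit : (s.map Prod.snd) = lowPos ++ (s.drop K).map Prod.snd := by
        rw [hlp, ← List.map_append, List.take_append_drop]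
      have hpw := (List.nodup_append.mp (hsplit ▸ hnodup)).2.2
      intro a ha hb
      exact hpw a ha a hb rfl
    have ht : (s.take K).map (fun p => (hi, p.2)) = (s.take K).map (fun p => (f p.2, p.2)) := by
      apply List.map_congr_left; intro p hp
      have hmem : p.2 ∈ lowPos := List.mem_map_of_mem hp
      simp [hf, hmem]
    have hd : (s.drop K).map (fun p => (lo, p.2)) = (s.drop K).map (fun p => (f p.2, p.2)) := by
      apply List.map_congr_left; intro p hp
      have hmem : p.2 ∈ (s.drop K).map Prod.snd := List.mem_map_of_mem hp
      have hnm : p.2 ∉ lowPos := fun hc => hdisj hc hmem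
      simp [hf, hnm]
    rw [ht, hd, ← List.map_append, List.take_append_drop]
  rw [hgmA]
  have hsorted : PySem.List.sorted (s.map (fun p => (f p.2, p.2))) (fun x => x.2) = m' := by
    apply PySem.List.sorted_eq_of_perm_of_pairwise_lt
    · have hc : s.map (fun p => (f p.2, p.2)) = (s.map Prod.snd).map (fun j => (f j, j)) := by
        rw [List.map_map]; rfl
      rw [hm', hc]
      exact (hsnds.map _).symm
    · rw [hm']
      exact List.Pairwise.map _ (fun a b hab => hab)
        (PySem.List.pairwise_lt_pyRange_one 0 (N : Int))
  rw [hsorted, hm', List.map_map]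
  rw [PySem.List.slice_to s (by positivity), Int.toNat_natCast,
    PySem.List.pyRepeat_singleton, Int.toNat_natCast]
  apply List.ext_getElem?
  intro j
  rw [foldl_set_getElem? (s.take K) hi (fun p hp => hposnn p (List.mem_of_mem_take hp))]
  simp only [List.getElem?_map, PySem.List.getElem?_pyRange_one, List.length_replicate,
    List.getElem?_replicate, ← hlp]
  have hNt : ((N : Int) - 0).toNat = N := by omega
  rw [hNt]
  by_cases hj : j < N <;> by_cases hmem : ((j : Int)) ∈ lowPos <;>
    simp [hj, hmem, hf]

-- ===== VERDICT (by name: the statement is the Claim_ definition above) =====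
theorem medians_spec : Claim_equal_medians := by
  intro nums _ hpre
  exact medians_eq nums hpre
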